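-- pv_equiv track=rewrite | github.com/carlegbert/advent-of-code | aoc24/solutions/p02.py | _report_valid
-- ===== SOURCE A (Python) =====
-- def _report_valid(report: list[int], skip_idx: int) -> bool:
--     prev = None
--     ascents = descents = 0
--
--     for i, cur in enumerate(report):
--         if i == skip_idx:
--             continue
--
--         if prev is None:
--             prev = cur
--             continue
--
--         diff = cur - prev
--         if abs(diff) > 3:
--             return False
--
--         if diff == 0:
--             return False
--
--         if diff > 0:
--             ascents += 1
--         else:
--             descents += 1
--
--         if ascents and descents:
--             return False
--
--         prev = cur
--
--     return True
-- ===== SOURCE B (Python) =====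
-- def _report_valid(report: list[int], skip_idx: int) -> bool:
--     vals = [x for i, x in enumerate(report) if i != skip_idx]
--     diffs = [b - a for a, b in zip(vals, vals[1:])]
--     return all(1 <= abs(d) <= 3 for d in diffs) and (
--         all(d > 0 for d in diffs) or all(d < 0 for d in diffs)
--     )
-- ===== Notes on version B (the rewrite author's own statement) =====
-- stated objective: simpler
-- what changed: Replaces A's single-pass early-return state machine (prev, ascents, descents counters) with a declarative decomposition: filter out the skipped index, precompute the list of consecutive differences, then validate it with all() predicates for range and monotone sign.
import Mathlib
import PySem

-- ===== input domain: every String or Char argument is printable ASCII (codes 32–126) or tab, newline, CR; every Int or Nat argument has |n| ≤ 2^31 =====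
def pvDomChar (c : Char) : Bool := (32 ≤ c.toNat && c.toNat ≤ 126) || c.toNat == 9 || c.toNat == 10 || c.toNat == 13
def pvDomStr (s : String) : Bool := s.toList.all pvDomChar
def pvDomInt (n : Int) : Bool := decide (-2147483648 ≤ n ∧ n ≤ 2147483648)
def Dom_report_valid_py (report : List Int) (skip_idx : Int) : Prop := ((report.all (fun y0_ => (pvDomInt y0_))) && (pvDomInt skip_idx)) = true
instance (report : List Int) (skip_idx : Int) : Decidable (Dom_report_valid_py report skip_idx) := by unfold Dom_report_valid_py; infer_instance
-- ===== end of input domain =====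

-- B replaces A's single-pass early-return state machine (prev/ascents/descents) with a
-- precompute-the-consecutive-differences list validated by all() predicates; objective: simpler.

-- ===== PORT A =====
-- loop of _report_valid: state (prev, ascents, descents), early `return False` = result false
def reportValidGoA (skip_idx : Int) : List (Int × Int) → Option Int → Int → Int → Bool
  | [], _, _, _ => true
  | (i, cur) :: rest, prev, ascents, descents =>
    if i == skip_idx then reportValidGoA skip_idx rest prev ascents descents
    else
      match prev with
      | none => reportValidGoA skip_idx rest (some cur) ascents descents
      | some p =>
        let diff := cur - p
        if |diff| > 3 then false
        else if diff = 0 then false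
        else
          let ascents' := if diff > 0 then ascents + 1 else ascents
          let descents' := if diff > 0 then descents else descents + 1
          if ascents' ≠ 0 ∧ descents' ≠ 0 then false
          else reportValidGoA skip_idx rest (some cur) ascents' descents'

def report_valid_py (report : List Int) (skip_idx : Int) : Bool :=
  reportValidGoA skip_idx (PySem.List.enumerate report) none 0 0

-- ===== PORT B =====
def report_valid_py_alt (report : List Int) (skip_idx : Int) : Bool :=
  let vals := ((PySem.List.enumerate report).filter (fun p => p.1 != skip_idx)).map (·.2)
  let diffs := List.zipWith (fun a b => b - a) vals vals.tail
  (diffs.all (fun d => decide (1 ≤ |d|) && decide (|d| ≤ 3))) &&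
    ((diffs.all (fun d => decide (0 < d))) || (diffs.all (fun d => decide (d < 0))))

-- ===== PRECONDITION & SPEC =====
def Spec_report_valid_py (report : List Int) (skip_idx : Int) (out : Bool) : Prop := out = report_valid_py_alt report skip_idx
instance (report : List Int) (skip_idx : Int) (out : Bool) : Decidable (Spec_report_valid_py report skip_idx out) := by unfold Spec_report_valid_py; infer_instance

-- ===== CLAIM (what is proved, stated in full; the proofs are below) =====
def Claim_equal_report_valid_py : Prop := ∀ (report : List Int) (skip_idx : Int), Dom_report_valid_py report skip_idx → Spec_report_valid_py report skip_idx (report_valid_py report skip_idx)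

-- ===== LEMMAS AND PROOFS =====

-- A's loop after the skip-filter has been performed (proof helper)
def reportValidGo2 : List Int → Option Int → Int → Int → Bool
  | [], _, _, _ => true
  | cur :: rest, none, ascents, descents => reportValidGo2 rest (some cur) ascents descents
  | cur :: rest, some p, ascents, descents =>
    let diff := cur - p
    if |diff| > 3 then false
    else if diff = 0 then false
    else
      let ascents' := if diff > 0 then ascents + 1 else ascents
      let descents' := if diff > 0 then descents else descents + 1
      if ascents' ≠ 0 ∧ descents' ≠ 0 then false
      else reportValidGo2 rest (some cur) ascents' descents'

def rvDiffs (vs : List Int) : List Int := List.zipWith (fun a b => b - a) vs vs.tail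

def rvRangeAll (vs : List Int) : Bool := (rvDiffs vs).all (fun d => decide (1 ≤ |d|) && decide (|d| ≤ 3))
def rvPosAll (vs : List Int) : Bool := (rvDiffs vs).all (fun d => decide (0 < d))
def rvNegAll (vs : List Int) : Bool := (rvDiffs vs).all (fun d => decide (d < 0))

theorem goA_eq_go2 (skip_idx : Int) (pairs : List (Int × Int)) :
    ∀ (prev : Option Int) (a d : Int),
      reportValidGoA skip_idx pairs prev a d =
        reportValidGo2 ((pairs.filter (fun p => p.1 != skip_idx)).map (·.2)) prev a d := by
  induction pairs with
  | nil => intro prev a d; rfl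
  | cons hd tl ih =>
    intro prev a d
    obtain ⟨i, cur⟩ := hd
    by_cases h : i = skip_idx
    · simp [reportValidGoA, h, ih]
    · cases prev with
      | none => simp [reportValidGoA, reportValidGo2, h, ih]
      | some p => simp [reportValidGoA, reportValidGo2, h, ih]

theorem go2_main (rest : List Int) : ∀ (p a d : Int), 0 ≤ a → 0 ≤ d → ¬(0 < a ∧ 0 < d) →
    reportValidGo2 rest (some p) a d =
      (rvRangeAll (p :: rest) &&
        (if 0 < a then rvPosAll (p :: rest)
         else if 0 < d then rvNegAll (p :: rest)
         else rvPosAll (p :: rest) || rvNegAll (p :: rest))) := by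
  induction rest with
  | nil =>
    intro p a d _ _ _
    simp [reportValidGo2, rvRangeAll, rvPosAll, rvNegAll, rvDiffs]
  | cons c t ih =>
    intro p a d ha hd hnot
    have hdiffs : rvDiffs (p :: c :: t) = (c - p) :: rvDiffs (c :: t) := by
      simp [rvDiffs]
    rcases lt_trichotomy p c with hp | heq | hq
    · -- ascent: p < c
      have habs : |c - p| = c - p := abs_of_pos (by omega)
      have h0 : ¬ c - p = 0 := by omega
      by_cases h3 : c - p > 3
      · have hr : rvRangeAll (p :: c :: t) = false := by
          simp [rvRangeAll, hdiffs, habs]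
          omega
        have hl : reportValidGo2 (c :: t) (some p) a d = false := by
          simp [reportValidGo2, habs, h3]
        simp [hl, hr]
      · have hOk : (decide (1 ≤ |c - p|) && decide (|c - p| ≤ 3)) = true := by
          simp [habs]; omega
        have hrOk : rvRangeAll (p :: c :: t) = rvRangeAll (c :: t) := by
          simp [rvRangeAll, hdiffs] at hOk ⊢
          simp [hOk]
        have hpos : rvPosAll (p :: c :: t) = rvPosAll (c :: t) := by
          simp [rvPosAll, hdiffs, hp]
        have hneg : rvNegAll (p :: c :: t) = false := by
          simp [rvNegAll, hdiffs]
          omega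
        by_cases hdpos : 0 < d
        · have hA : ¬ 0 < a := by omega
          have hd0 : d ≠ 0 := by omega
          have hl : reportValidGo2 (c :: t) (some p) a d = false := by
            simp [reportValidGo2, habs, h3, h0, hp, hd0]
            intro h; omega
          simp [hl, hrOk, hdpos, hA, hneg]
        · have hD : d = 0 := by omega
          have step : reportValidGo2 (c :: t) (some p) a d =
              reportValidGo2 t (some c) (a + 1) d := by
            simp [reportValidGo2, habs, h3, h0, hp, hD]
          rw [step, ih c (a + 1) d (by omega) hd (by omega)]
          subst hD
          have h01 : (0:Int) < a + 1 := by omega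
          by_cases ha0 : 0 < a
          · simp [h01, ha0, hrOk, hpos]
          · have hA : a = 0 := by omega
            simp [h01, ha0, hrOk, hpos, hneg]

    · -- equal: zero diff
      have h0 : c - p = 0 := by omega
      have hr : rvRangeAll (p :: c :: t) = false := by
        simp [rvRangeAll, hdiffs, h0]
      have hl : reportValidGo2 (c :: t) (some p) a d = false := by
        simp [reportValidGo2, h0]
      simp [hl, hr]
    · -- descent: c < p
      have habs : |c - p| = p - c := by
        rw [abs_sub_comm]; exact abs_of_pos (by omega)
      have h0 : ¬ c - p = 0 := by omega
      have hnp : ¬ p < c := by omega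
      by_cases h3 : p - c > 3
      · have hr : rvRangeAll (p :: c :: t) = false := by
          simp [rvRangeAll, hdiffs, habs]
          omega
        have hl : reportValidGo2 (c :: t) (some p) a d = false := by
          simp [reportValidGo2, habs, h3]
        simp [hl, hr]
      · have hOk : (decide (1 ≤ |c - p|) && decide (|c - p| ≤ 3)) = true := by
          simp [habs]; omega
        have hrOk : rvRangeAll (p :: c :: t) = rvRangeAll (c :: t) := by
          simp [rvRangeAll, hdiffs] at hOk ⊢
          simp [hOk]
        have hneg : rvNegAll (p :: c :: t) = rvNegAll (c :: t) := by
          simp [rvNegAll, hdiffs, hq]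
        have hpos : rvPosAll (p :: c :: t) = false := by
          simp [rvPosAll, hdiffs]
          omega
        by_cases hapos : 0 < a
        · have ha0 : a ≠ 0 := by omega
          have hl : reportValidGo2 (c :: t) (some p) a d = false := by
            simp [reportValidGo2, habs, h3, h0, hnp, ha0]
            intro h; omega
          simp [hl, hrOk, hapos, hpos]
        · have hA : a = 0 := by omega
          have step : reportValidGo2 (c :: t) (some p) a d =
              reportValidGo2 t (some c) a (d + 1) := by
            simp [reportValidGo2, habs, h3, h0, hnp, hA]
          rw [step, ih c a (d + 1) ha (by omega) (by omega)]
          subst hA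
          have h01 : (0:Int) < d + 1 := by omega
          by_cases hd0 : 0 < d
          · simp [h01, hd0, hrOk, hneg]
          · have hD : d = 0 := by omega
            simp [h01, hd0, hrOk, hneg, hpos]

-- ===== VERDICT (by name: the statement is the Claim_ definition above) =====
theorem report_valid_py_spec : Claim_equal_report_valid_py := by
  intro report skip_idx _
  unfold Spec_report_valid_py report_valid_py report_valid_py_alt
  rw [goA_eq_go2]
  set vals := ((PySem.List.enumerate report).filter (fun p => p.1 != skip_idx)).map (·.2) with hvals
  cases vals with
  | nil => simp [reportValidGo2]
  | cons c t =>
    have h := go2_main t c 0 0 le_rfl le_rfl (by omega)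
    simp only [reportValidGo2, h]
    simp [rvRangeAll, rvPosAll, rvNegAll, rvDiffs]
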